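/- GENERATED by farm/mkstatement.py from design/units.tsv (unit `decode_residue.1a`) and the assertions of Vorbis/Spec/DecodeResidue1.lean — do not edit.
   THE STATEMENT of the proof unit `decode_residue.1a`: segment 1a of `decode_residue` (26 instructions; entries 0x10ec00;
   exits 0x10ec95; ranges 0x10ec00-0x10ec90)
   takes each of its entry assertions to one of its exit assertions (`Vorbis.Spec.DecodeResidue.Seg1a`), given the contracts of its callees.
   What the names mean: Vorbis/Spec/Basic.lean (the shared hypotheses), Vorbis/Spec/DecodeResidue1.lean (the assertions). The theorem to prove:
   `theorem decode_residue_1a_ok : Vorbis.Spec.decode_residue_1a.Statement`. -/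
import Vorbis.Spec.DecodeResidue1
namespace Vorbis.Spec.decode_residue_1a
open X86 X86.User Asan

/-- The statement of unit `decode_residue.1a`. -/
def Statement : Prop :=
  ∀ (Lay : Layout) (_hLay : Lay.hi = 0x1000000) (μ : Microarch) (_hμ : UserX.MicroOK μ) (u₀ : State)
    (_hcode : HasCodeNat Lay u₀ Vorbis.L.decode_residue.entry Vorbis.Code.code_decode_residue.nat Vorbis.L.decode_residue.size)
    (_h_asan_load8_noabort : Asan.SmallCheck Lay μ Vorbis.WayInv (Vorbis.CodeOK u₀) [.rax, .rcx, .rdx] 8 Vorbis.L.__asan_load8_noabort.entry),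
    Vorbis.Spec.DecodeResidue.Seg1a Lay μ u₀

end Vorbis.Spec.decode_residue_1a
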